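-- pv_equiv track=rewrite | github.com/jdanray/leetcode | chalkReplacer.py | chalkReplacer
-- ===== SOURCE A (Python) =====
-- def chalkReplacer(chalk, k):
-- 	s = sum(chalk)
-- 	r = k % s
-- 	for i, c in enumerate(chalk):
-- 		if c > r:
-- 			return i
-- 		else:
-- 			r -= c
-- 	return 0
-- ===== SOURCE B (Python) =====
-- def chalkReplacer(chalk, k):
--     prefix = []
--     t = 0
--     for c in chalk:
--         t += c
--         prefix.append(t)
--     r = k % prefix[-1]
--     ans = 0
--     for i, p in reversed(list(enumerate(prefix))):
--         if p > r:
--             ans = i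
--     return ans
-- ===== Notes on version B (the rewrite author's own statement) =====
-- stated objective: alternative
-- what changed: B builds the inclusive prefix-sum table once and scans it back-to-front keeping the last (i.e. first-in-order) index whose prefix sum exceeds k % total, instead of A's forward running-subtraction scan with an early return.
import Mathlib
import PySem

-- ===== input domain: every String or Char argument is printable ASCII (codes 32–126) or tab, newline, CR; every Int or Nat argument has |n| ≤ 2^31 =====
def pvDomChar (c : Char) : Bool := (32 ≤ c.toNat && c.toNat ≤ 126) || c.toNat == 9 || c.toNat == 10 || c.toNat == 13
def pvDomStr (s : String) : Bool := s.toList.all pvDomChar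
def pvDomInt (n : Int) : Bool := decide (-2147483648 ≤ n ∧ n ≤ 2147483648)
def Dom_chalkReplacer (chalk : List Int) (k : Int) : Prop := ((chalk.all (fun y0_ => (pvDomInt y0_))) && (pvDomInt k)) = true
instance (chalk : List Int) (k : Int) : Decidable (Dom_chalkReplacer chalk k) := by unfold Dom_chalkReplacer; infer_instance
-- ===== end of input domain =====

-- B builds the inclusive prefix-sum table once and scans it back-to-front keeping the
-- first index whose prefix sum exceeds k % total, instead of A's forward running-subtraction
-- scan with an early return; same cost, different traversal and state ("alternative").


-- ===== PORT A =====
-- the for-loop with early return: running remainder r, absolute index i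
def chalkAuxA : List Int → Int → Int → Int
  | [], _, _ => 0
  | c :: cs, r, i => if c > r then i else chalkAuxA cs (r - c) (i + 1)

def chalkReplacer (chalk : List Int) (k : Int) : Int :=
  let s := chalk.foldl (· + ·) 0
  let r := PySem.Int.mod k s
  chalkAuxA chalk r 0

-- ===== PORT B =====
-- the prefix-building loop of Source B: running total t, appends t+c
def prefixesB : List Int → Int → List Int
  | [], _ => []
  | c :: cs, t => (t + c) :: prefixesB cs (t + c)

def chalkReplacer_alt (chalk : List Int) (k : Int) : Int :=
  let pre := prefixesB chalk 0
  let r := PySem.Int.mod k ((PySem.List.pyGet? pre (-1)).getD 0)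
  (PySem.List.enumerate pre 0).reverse.foldl
    (fun ans ip => if ip.2 > r then ip.1 else ans) 0

-- ===== PRECONDITION & SPEC =====
-- Pre_ excludes exactly the inputs where Python A raises ZeroDivisionError (k % sum with sum(chalk) == 0).
def Pre_chalkReplacer (chalk : List Int) (k : Int) : Prop := chalk.sum ≠ 0
instance (chalk : List Int) (k : Int) : Decidable (Pre_chalkReplacer chalk k) := by unfold Pre_chalkReplacer; infer_instance
def pvWitness_chalkReplacer : List Int × Int := ([5, 1, 5], 22)

def Spec_chalkReplacer (chalk : List Int) (k : Int) (out : Int) : Prop := out = chalkReplacer_alt chalk k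
instance (chalk : List Int) (k : Int) (out : Int) : Decidable (Spec_chalkReplacer chalk k out) := by unfold Spec_chalkReplacer; infer_instance

-- ===== CLAIM (what is proved, stated in full; the proofs are below) =====
def Claim_equal_chalkReplacer : Prop := ∀ (chalk : List Int) (k : Int), Dom_chalkReplacer chalk k → Pre_chalkReplacer chalk k → Spec_chalkReplacer chalk k (chalkReplacer chalk k)

-- ===== LEMMAS AND PROOFS =====

-- the reversed fold keeping the last hit equals the first hit of the forward list
theorem revfold_eq_find (r : Int) : ∀ (l : List (Int × Int)) (d : Int),
    l.reverse.foldl (fun ans ip => if ip.2 > r then ip.1 else ans) d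
      = ((l.find? (fun ip => decide (ip.2 > r))).map (·.1)).getD d := by
  intro l
  induction l with
  | nil => intro d; simp
  | cons x xs ih =>
      intro d
      by_cases h : x.2 > r <;>
        simp [List.foldl_append, h, ih]

-- A's scan with running remainder = first index in B's prefix table exceeding t + r
theorem auxA_eq_find : ∀ (cs : List Int) (r t i : Int),
    chalkAuxA cs r i
      = (((PySem.List.enumerate (prefixesB cs t) i).find?
            (fun ip => decide (ip.2 > t + r))).map (·.1)).getD 0 := by
  intro cs
  induction cs with
  | nil => intro r t i; simp [chalkAuxA, prefixesB]
  | cons c cs ih =>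
      intro r t i
      by_cases h : c > r
      · have h' : t + c > t + r := by omega
        simp [chalkAuxA, prefixesB, PySem.List.enumerate_cons, h, h']
      · have h' : ¬ (t + c > t + r) := by omega
        have := ih (r - c) (t + c) (i + 1)
        have ht : t + c + (r - c) = t + r := by ring
        rw [ht] at this
        simp [chalkAuxA, prefixesB, PySem.List.enumerate_cons, h, h', this]

-- the last entry of the prefix table is the total
theorem prefixesB_getLast? : ∀ (cs : List Int) (t : Int), cs ≠ [] →
    (prefixesB cs t).getLast? = some (cs.foldl (· + ·) t) := by
  intro cs
  induction cs with
  | nil => intro t h; exact absurd rfl h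
  | cons c cs ih =>
      intro t _
      cases cs with
      | nil => simp [prefixesB]
      | cons c' cs' =>
          have := ih (t + c) (by simp)
          simp [prefixesB, List.foldl] at this ⊢
          simpa using this

-- ===== VERDICT (by name: the statement is the Claim_ definition above) =====
theorem chalkReplacer_spec : Claim_equal_chalkReplacer := by
  intro chalk k _ hpre
  have hne : chalk ≠ [] := by
    intro h; exact hpre (by simp [h])
  unfold Spec_chalkReplacer chalkReplacer chalkReplacer_alt
  dsimp only
  rw [revfold_eq_find]
  rw [PySem.List.pyGet?_neg_one, prefixesB_getLast? chalk 0 hne]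
  simp only [Option.getD_some]
  have := auxA_eq_find chalk (PySem.Int.mod k (chalk.foldl (· + ·) 0)) 0 0
  rw [this]
  norm_num
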